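-- pv_equiv track=rewrite | github.com/zyyjjj/saasbo | saasbo.py | get_dyadic_dims
-- ===== SOURCE A (Python) =====
-- import time, os, itertools, math
--
-- def get_dyadic_dims(n_dims):
--     """
--     INPUT: n_dim, the number of total dimensions of the problem (e.g., 50 or 100)
--     OUTPUT: a nested list of dimensions to perturb at each round;
--             the length of the list is equal to the length of the binary representation of n_dim
--     """
--
--     l = int(math.log2(n_dims)) + 1
--
--     # generate list of length (l-1) strings with all possible combinations of 0's and 1's in each digit
--     base_strings = list(''.join(comb) for comb in itertools.product('01', repeat = l-1))
--
--     dyadic_dims = []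
--     for loc in range(l):
--         # insert '1' into location loc in each string in base_digits
--         # then convert to int
--
--         single_set = []
--
--         for base_string in base_strings:
--             dim_after_insertion = int(''.join((base_string[:loc], '1', base_string[loc:])), 2)
--             if dim_after_insertion < n_dims:
--                 single_set.append(dim_after_insertion)
--
--         dyadic_dims.append(single_set)
--
--     return dyadic_dims
-- ===== SOURCE B (Python) =====
-- import math
--
-- def get_dyadic_dims(n_dims):
--     # Same index sets as the string-insertion enumeration, produced by a direct
--     # ascending scan: round loc keeps exactly the numbers below n_dims whose
--     # bit at position l-1-loc is set.
--     l = int(math.log2(n_dims)) + 1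
--     return [[x for x in range(1 << l)
--              if x // 2 ** (l - 1 - loc) % 2 == 1 and x < n_dims]
--             for loc in range(l)]
-- ===== Notes on version B (the rewrite author's own statement) =====
-- stated objective: simpler
-- what changed: Replaces the itertools.product string enumeration, '1'-insertion and base-2 string parsing with a direct ascending scan of range(1 << l) keeping the numbers whose bit l-1-loc is set and which are below n_dims (no string building/parsing).
import Mathlib
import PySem

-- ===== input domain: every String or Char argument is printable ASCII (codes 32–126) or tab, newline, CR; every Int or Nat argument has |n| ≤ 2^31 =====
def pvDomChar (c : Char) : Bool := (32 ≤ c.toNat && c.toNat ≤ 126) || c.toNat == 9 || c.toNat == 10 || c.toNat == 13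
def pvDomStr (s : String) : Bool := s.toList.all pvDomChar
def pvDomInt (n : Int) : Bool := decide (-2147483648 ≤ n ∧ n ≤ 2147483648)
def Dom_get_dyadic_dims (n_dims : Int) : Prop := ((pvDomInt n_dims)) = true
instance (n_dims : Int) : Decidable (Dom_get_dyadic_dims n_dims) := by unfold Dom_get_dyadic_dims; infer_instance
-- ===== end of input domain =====

-- B replaces A's string-product enumeration with an ascending numeric scan and a bit test (simpler).

-- ===== PORT A =====
-- itertools.product('01', repeat = k), each tuple already joined to its character list
def pvProduct01 : Nat → List (List Char)
  | 0 => [[]]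
  | k + 1 => (pvProduct01 k).map (fun s => '0' :: s) ++ (pvProduct01 k).map (fun s => '1' :: s)

-- int(s, 2) for a string of '0'/'1' characters (exact on A's strings, which contain only '0'/'1')
def pvParse2 (s : List Char) : Nat := s.foldl (fun a c => 2 * a + (if c = '1' then 1 else 0)) 0

def get_dyadic_dims (n_dims : Int) : List (List Int) :=
  -- int(math.log2(n_dims)) + 1: exact for 1 ≤ n_dims ≤ 2^31 (bit length), the Pre_ ∩ Dom domain
  let l : Nat := Nat.log2 n_dims.toNat + 1
  let base_strings : List (List Char) := pvProduct01 (l - 1)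
  (PySem.List.pyRange 0 (l : Int) 1).foldl (fun dyadic_dims loc =>
    let single_set : List Int := base_strings.foldl (fun single_set base_string =>
      -- base_string[:loc] and [loc:] with 0 ≤ loc < l: exact as take/drop
      let dim_after_insertion : Int :=
        (pvParse2 (base_string.take loc.toNat ++ '1' :: base_string.drop loc.toNat) : Nat)
      if dim_after_insertion < n_dims then single_set ++ [dim_after_insertion] else single_set) []
    dyadic_dims ++ [single_set]) []

-- ===== PORT B =====
def get_dyadic_dims_alt (n_dims : Int) : List (List Int) :=
  -- int(math.log2(n_dims)) + 1: exact for 1 ≤ n_dims ≤ 2^31 (bit length), the Pre_ ∩ Dom domain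
  let l : Nat := Nat.log2 n_dims.toNat + 1
  (PySem.List.pyRange 0 (l : Int) 1).map (fun loc =>
    (PySem.List.pyRange 0 ((2 ^ l : Nat) : Int) 1).filter (fun x =>
      -- 2 ** (l - 1 - loc) with 0 ≤ loc ≤ l-1: the exponent is the Nat l - 1 - loc.toNat
      decide (PySem.Int.mod (PySem.Int.floordiv x ((2 ^ (l - 1 - loc.toNat) : Nat) : Int)) 2 = 1)
        && decide (x < n_dims)))

-- ===== PRECONDITION & SPEC =====
-- Pre_ excludes exactly the non-positive inputs, where math.log2 raises ValueError in A (and in B).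
def Pre_get_dyadic_dims (n_dims : Int) : Prop := 1 ≤ n_dims
instance (n_dims : Int) : Decidable (Pre_get_dyadic_dims n_dims) := by unfold Pre_get_dyadic_dims; infer_instance
def pvWitness_get_dyadic_dims : Int := (5)

def Spec_get_dyadic_dims (n_dims : Int) (out : List (List Int)) : Prop := out = get_dyadic_dims_alt n_dims
instance (n_dims : Int) (out : List (List Int)) : Decidable (Spec_get_dyadic_dims n_dims out) := by unfold Spec_get_dyadic_dims; infer_instance

-- ===== CLAIM (what is proved, stated in full; the proofs are below) =====
def Claim_equal_get_dyadic_dims : Prop := ∀ (n_dims : Int), Dom_get_dyadic_dims n_dims → Pre_get_dyadic_dims n_dims → Spec_get_dyadic_dims n_dims (get_dyadic_dims n_dims)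

-- ===== LEMMAS AND PROOFS =====

-- every string in pvProduct01 k has length k
theorem pvProduct01_length {k : Nat} {s : List Char} (h : s ∈ pvProduct01 k) : s.length = k := by
  induction k generalizing s with
  | zero => simp [pvProduct01] at h; simp [h]
  | succ k ih =>
    simp only [pvProduct01, List.mem_append, List.mem_map] at h
    rcases h with ⟨t, ht, rfl⟩ | ⟨t, ht, rfl⟩ <;> simp [ih ht]

-- foldl of the parse step from an arbitrary accumulator
theorem pvParse2_foldl (s : List Char) (a : Nat) :
    s.foldl (fun a c => 2 * a + (if c = '1' then 1 else 0)) a = a * 2 ^ s.length + pvParse2 s := by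
  induction s generalizing a with
  | nil => simp [pvParse2]
  | cons c t ih =>
    simp only [List.foldl_cons, pvParse2, List.length_cons]
    rw [ih, ih (2 * 0 + _)]
    ring

theorem pvParse2_cons (c : Char) (s : List Char) :
    pvParse2 (c :: s) = (if c = '1' then 1 else 0) * 2 ^ s.length + pvParse2 s := by
  simp only [pvParse2, List.foldl_cons]
  rw [pvParse2_foldl]
  simp [pvParse2]

-- parsing with a '0' / '1' head
theorem pvParse2_map_cons0 (P : List (List Char)) (k : Nat)
    (g : List Char → List Char)
    (hg : ∀ s ∈ P, (g s).length = k) :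
    (P.map (fun s => pvParse2 ('0' :: g s))) = P.map (fun s => pvParse2 (g s)) := by
  apply List.map_congr_left; intro s hs
  simp [pvParse2_cons, hg s hs]

theorem pvParse2_map_cons1 (P : List (List Char)) (k : Nat)
    (g : List Char → List Char)
    (hgl : ∀ s ∈ P, (g s).length = k) :
    (P.map (fun s => pvParse2 ('1' :: g s))) = P.map (fun s => 2 ^ k + pvParse2 (g s)) := by
  apply List.map_congr_left; intro s hs
  simp [pvParse2_cons, hgl s hs]

-- parsing all base strings in product order yields 0, 1, …, 2^k - 1
theorem pvParse2_product01 (k : Nat) :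
    (pvProduct01 k).map pvParse2 = List.range (2 ^ k) := by
  induction k with
  | zero => simp [pvProduct01, pvParse2]
  | succ k ih =>
    have hsplit : List.range (2 ^ (k + 1)) =
        List.range (2 ^ k) ++ (List.range (2 ^ k)).map (2 ^ k + ·) := by
      have h2 : 2 ^ (k + 1) = 2 ^ k + 2 ^ k := by ring
      rw [h2, List.range_add]
    have e0 : ((pvProduct01 k).map (fun s => '0' :: s)).map pvParse2 =
        (pvProduct01 k).map pvParse2 := by
      rw [List.map_map]
      exact pvParse2_map_cons0 _ k id (fun s hs => pvProduct01_length hs)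
    have e1 : ((pvProduct01 k).map (fun s => '1' :: s)).map pvParse2 =
        ((pvProduct01 k).map pvParse2).map (2 ^ k + ·) := by
      rw [List.map_map, List.map_map]
      exact pvParse2_map_cons1 _ k id (fun s hs => pvProduct01_length hs)
    rw [pvProduct01, List.map_append, e0, e1, ih, hsplit]

-- the main enumeration lemma: inserting '1' at position loc over all base strings
-- enumerates, in ascending order, exactly the numbers below 2^(k+1) whose bit (k - loc) is set
theorem pvInsert_enum (loc k : Nat) (hk : loc ≤ k) :
    (pvProduct01 k).map (fun s => pvParse2 (s.take loc ++ '1' :: s.drop loc)) =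
      (List.range (2 ^ (k + 1))).filter (fun x => decide (x / 2 ^ (k - loc) % 2 = 1)) := by
  induction loc generalizing k with
  | zero =>
    have h1 : (pvProduct01 k).map (fun s => pvParse2 (s.take 0 ++ '1' :: s.drop 0)) =
        (List.range (2 ^ k)).map (2 ^ k + ·) := by
      have := pvParse2_map_cons1 (pvProduct01 k) k id (fun s hs => pvProduct01_length hs)
      simp only [id] at this
      simp only [List.take_zero, List.drop_zero, List.nil_append]
      rw [this, ← pvParse2_product01, List.map_map]
      rfl
    rw [h1]
    have hsplit : List.range (2 ^ (k + 1)) =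
        List.range (2 ^ k) ++ (List.range (2 ^ k)).map (2 ^ k + ·) := by
      have h2 : 2 ^ (k + 1) = 2 ^ k + 2 ^ k := by ring
      rw [h2, List.range_add]
    rw [hsplit, List.filter_append]
    have hlo : (List.range (2 ^ k)).filter (fun x => decide (x / 2 ^ (k - 0) % 2 = 1)) = [] := by
      rw [List.filter_eq_nil_iff]
      intro x hx
      simp only [List.mem_range] at hx
      simp [Nat.div_eq_of_lt hx]
    have hhi : ((List.range (2 ^ k)).map (2 ^ k + ·)).filter
        (fun x => decide (x / 2 ^ (k - 0) % 2 = 1)) = (List.range (2 ^ k)).map (2 ^ k + ·) := by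
      rw [List.filter_eq_self]
      intro x hx
      simp only [List.mem_map, List.mem_range] at hx
      obtain ⟨j, hj, rfl⟩ := hx
      have hdiv : (2 ^ k + j) / 2 ^ k = 1 := by
        rw [Nat.add_comm, Nat.add_div_right _ (Nat.two_pow_pos k), Nat.div_eq_of_lt hj]
      simp [hdiv]
    rw [hlo, hhi, List.nil_append]
  | succ loc ih =>
    obtain ⟨k', rfl⟩ : ∃ k', k = k' + 1 := ⟨k - 1, by omega⟩
    have hk' : loc ≤ k' := by omega
    have hQ := ih k' hk'
    have hm : k' + 1 - (loc + 1) = k' - loc := by omega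
    rw [hm]
    have hsplit : List.range (2 ^ (k' + 1 + 1)) =
        List.range (2 ^ (k' + 1)) ++ (List.range (2 ^ (k' + 1))).map (2 ^ (k' + 1) + ·) := by
      have h2 : 2 ^ (k' + 1 + 1) = 2 ^ (k' + 1) + 2 ^ (k' + 1) := by ring
      rw [h2, List.range_add]
    have hbit : ∀ x < 2 ^ (k' + 1),
        ((2 ^ (k' + 1) + x) / 2 ^ (k' - loc) % 2 = 1) ↔
          (x / 2 ^ (k' - loc) % 2 = 1) := by
      intro x hx
      have hpow : 2 ^ (k' + 1) = 2 ^ (k' - loc) * (2 * 2 ^ (k' - (k' - loc))) := by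
        rw [← mul_assoc, mul_comm (2 ^ (k' - loc)) 2, ← pow_succ', ← pow_add]
        congr 1
        omega
      rw [hpow, Nat.mul_add_div (Nat.two_pow_pos _), Nat.add_comm,
        Nat.add_mul_mod_self_left]
    have hsecond : ((List.range (2 ^ (k' + 1))).map (2 ^ (k' + 1) + ·)).filter
          (fun x => decide (x / 2 ^ (k' - loc) % 2 = 1)) =
        ((List.range (2 ^ (k' + 1))).filter
          (fun x => decide (x / 2 ^ (k' - loc) % 2 = 1))).map (2 ^ (k' + 1) + ·) := by
      rw [List.filter_map]
      congr 1
      apply List.filter_congr; intro x hx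
      simp only [List.mem_range] at hx
      simp only [Function.comp]
      rw [decide_eq_decide]
      exact hbit x hx
    rw [hsplit, List.filter_append, hsecond, ← hQ]
    simp only [pvProduct01, List.map_append, List.map_map]
    congr 1 <;>
      · apply List.map_congr_left; intro t ht
        simp [Function.comp, pvParse2_cons, pvProduct01_length ht]

-- 'out.append(v)' folded over a list is map
theorem pvFoldl_append_map {α β : Type} (g : α → β) (l : List α) (acc : List β) :
    l.foldl (fun acc x => acc ++ [g x]) acc = acc ++ l.map g := by
  induction l generalizing acc with
  | nil => simp
  | cons x t ih => simp [ih]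

-- the two inner loops agree for every 0 ≤ loc < l
theorem pvInner_eq (n_dims : Int) (l : Nat) (hl1 : 1 ≤ l) (loc : Int)
    (_h0 : 0 ≤ loc) (hlt : loc < (l : Int)) :
    (pvProduct01 (l - 1)).foldl (fun single_set base_string =>
        if ((pvParse2 (base_string.take loc.toNat ++ '1' :: base_string.drop loc.toNat) : Nat) : Int)
            < n_dims then
          single_set ++
            [((pvParse2 (base_string.take loc.toNat ++ '1' :: base_string.drop loc.toNat) : Nat) : Int)]
        else single_set) [] =
      (PySem.List.pyRange 0 ((2 ^ l : Nat) : Int) 1).filter (fun x =>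
        decide (PySem.Int.mod (PySem.Int.floordiv x ((2 ^ (l - 1 - loc.toNat) : Nat) : Int)) 2 = 1)
          && decide (x < n_dims)) := by
  have hkloc : loc.toNat ≤ l - 1 := by omega
  -- A's inner loop: conditional append = filter-then-map
  rw [PySem.List.foldl_append_ite (fun base_string : List Char =>
      ((pvParse2 (base_string.take loc.toNat ++ '1' :: base_string.drop loc.toNat) : Nat) : Int)
        < n_dims)
    (fun base_string : List Char =>
      ((pvParse2 (base_string.take loc.toNat ++ '1' :: base_string.drop loc.toNat) : Nat) : Int))]
  rw [List.nil_append]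
  -- turn 'filter (f · < n) then map f' into 'map f then filter (· < n)',
  -- then rewrite the mapped list via the enumeration lemma
  have hA : (pvProduct01 (l - 1)).map (fun s =>
      ((pvParse2 (s.take loc.toNat ++ '1' :: s.drop loc.toNat) : Nat) : Int)) =
      ((List.range (2 ^ (l - 1 + 1))).filter
        (fun x => decide (x / 2 ^ (l - 1 - loc.toNat) % 2 = 1))).map (fun x : Nat => (x : Int)) := by
    rw [← pvInsert_enum loc.toNat (l - 1) hkloc, List.map_map]
    rfl
  rw [show (fun base_string : List Char =>
      decide (((pvParse2 (base_string.take loc.toNat ++ '1' :: base_string.drop loc.toNat) : Nat) : Int)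
        < n_dims)) = (fun v : Int => decide (v < n_dims)) ∘ (fun s : List Char =>
      ((pvParse2 (s.take loc.toNat ++ '1' :: s.drop loc.toNat) : Nat) : Int)) from rfl,
    ← List.filter_map, hA]
  -- B's side: pyRange over a Nat cast is the casted List.range, and the Int bit test is the Nat one
  have hl0 : l - 1 + 1 = l := by omega
  rw [hl0]
  have hB : PySem.List.pyRange 0 ((2 ^ l : Nat) : Int) 1 =
      (List.range (2 ^ l)).map (fun x : Nat => (x : Int)) := by
    rw [PySem.List.pyRange_one]
    simp only [Int.sub_zero, Int.toNat_natCast, zero_add]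
  rw [hB, List.filter_map, List.filter_map, List.filter_filter]
  congr 1
  apply List.filter_congr; intro x hx
  simp only [Function.comp]
  have hfd : PySem.Int.floordiv (x : Int) ((2 ^ (l - 1 - loc.toNat) : Nat) : Int) =
      ((x / 2 ^ (l - 1 - loc.toNat) : Nat) : Int) := PySem.Int.floordiv_natCast _ _
  have hmd : PySem.Int.mod ((x / 2 ^ (l - 1 - loc.toNat) : Nat) : Int) 2 =
      ((x / 2 ^ (l - 1 - loc.toNat) % 2 : Nat) : Int) := by
    have h := PySem.Int.mod_natCast (x / 2 ^ (l - 1 - loc.toNat)) 2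
    simp only [Nat.cast_ofNat] at h
    exact h
  rw [hfd, hmd, Bool.and_comm]
  congr 1
  rw [decide_eq_decide]
  exact_mod_cast Iff.rfl

-- ===== VERDICT (by name: the statement is the Claim_ definition above) =====
theorem get_dyadic_dims_spec : Claim_equal_get_dyadic_dims := by
  intro n_dims hdom hpre
  unfold Spec_get_dyadic_dims
  unfold get_dyadic_dims get_dyadic_dims_alt
  rw [pvFoldl_append_map, List.nil_append]
  apply List.map_congr_left
  intro loc hloc
  rw [PySem.List.mem_pyRange_one] at hloc
  exact pvInner_eq n_dims (Nat.log2 n_dims.toNat + 1) (by omega) loc hloc.1 hloc.2
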